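-- pv_equiv track=rewrite | github.com/ZhenlanJi/Unlearnable_Code | mutate/utility.py | avoid_definition
-- ===== SOURCE A (Python) =====
-- def avoid_definition(code, line_breaks, token_locations):
--     for t in token_locations:
--         all_lb = [i for i in line_breaks if i < t]
--         if not all_lb:
--             lb = -1
--         else:
--             lb = max(all_lb)
--         this_line = code[lb+1:t]
--         if "char " in this_line:
--             return False
--     return True
-- ===== SOURCE B (Python) =====
-- def avoid_definition(code, line_breaks, token_locations):
--     s = sorted(line_breaks)
--     for t in token_locations:
--         # binary search: leftmost index lo with s[lo] >= t (bisect_left)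
--         lo, hi = 0, len(s)
--         while lo < hi:
--             mid = (lo + hi) // 2
--             if s[mid] < t:
--                 lo = mid + 1
--             else:
--                 hi = mid
--         lb = s[lo - 1] if lo else -1
--         if "char " in code[lb + 1:t]:
--             return False
--     return True
-- ===== Notes on version B (the rewrite author's own statement) =====
-- stated objective: faster
-- what changed: B sorts line_breaks once and finds each token's preceding line break by binary search, instead of A's per-token scan that filters the whole break list and takes its max.
import Mathlib
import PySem

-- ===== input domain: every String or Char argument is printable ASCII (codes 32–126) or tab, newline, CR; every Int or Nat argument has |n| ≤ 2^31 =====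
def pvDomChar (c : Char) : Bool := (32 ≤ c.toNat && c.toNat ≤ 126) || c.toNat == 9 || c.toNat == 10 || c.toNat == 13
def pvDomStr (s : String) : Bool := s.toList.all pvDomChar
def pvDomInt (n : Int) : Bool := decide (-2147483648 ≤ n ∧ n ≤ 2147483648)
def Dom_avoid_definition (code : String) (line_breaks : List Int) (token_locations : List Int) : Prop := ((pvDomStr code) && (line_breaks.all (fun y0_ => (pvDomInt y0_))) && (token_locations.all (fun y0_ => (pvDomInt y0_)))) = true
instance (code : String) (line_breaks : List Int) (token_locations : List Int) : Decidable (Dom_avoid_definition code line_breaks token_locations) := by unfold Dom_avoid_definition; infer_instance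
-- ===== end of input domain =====

-- ===== PORT A =====
-- A: for each token, filter the whole break list for breaks before it and take the max.
def pvGoA (code : String) (line_breaks : List Int) : List Int → Bool
  | [] => true
  | t :: ts =>
    let all_lb := line_breaks.filter (fun i => decide (i < t))
    let lb : Int :=
      match PySem.List.max? all_lb (fun x => x) with
      | none => -1
      | some m => m
    let this_line := PySem.Str.slice code (some (lb + 1)) (some t)
    if PySem.Str.isIn "char " this_line then false else pvGoA code line_breaks ts

def avoid_definition (code : String) (line_breaks : List Int) (token_locations : List Int) : Bool :=
  pvGoA code line_breaks token_locations

-- ===== PORT B =====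
-- B: sort the breaks once, then binary-search (bisect_left) for each token.
-- the while loop of Source B; indices lo ≤ mid < hi ≤ len s, so getD's default is never read
def pvBisect (s : List Int) (t : Int) (lo hi : Nat) : Nat :=
  if lo < hi then
    if s.getD ((lo + hi) / 2) 0 < t then pvBisect s t ((lo + hi) / 2 + 1) hi
    else pvBisect s t lo ((lo + hi) / 2)
  else lo
  termination_by hi - lo
  decreasing_by all_goals omega

def pvGoB (code : String) (s : List Int) : List Int → Bool
  | [] => true
  | t :: ts =>
    let idx := pvBisect s t 0 s.length
    let lb : Int := if idx = 0 then -1 else s.getD (idx - 1) 0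
    if PySem.Str.isIn "char " (PySem.Str.slice code (some (lb + 1)) (some t)) then false
    else pvGoB code s ts

def avoid_definition_alt (code : String) (line_breaks : List Int) (token_locations : List Int) : Bool :=
  pvGoB code (PySem.List.sorted line_breaks (fun x => x) false) token_locations

-- ===== PRECONDITION & SPEC =====
def Spec_avoid_definition (code : String) (line_breaks : List Int) (token_locations : List Int) (out : Bool) : Prop := out = avoid_definition_alt code line_breaks token_locations
instance (code : String) (line_breaks : List Int) (token_locations : List Int) (out : Bool) : Decidable (Spec_avoid_definition code line_breaks token_locations out) := by unfold Spec_avoid_definition; infer_instance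

-- ===== CLAIM (what is proved, stated in full; the proofs are below) =====
def Claim_equal_avoid_definition : Prop := ∀ (code : String) (line_breaks : List Int) (token_locations : List Int), Dom_avoid_definition code line_breaks token_locations → Spec_avoid_definition code line_breaks token_locations (avoid_definition code line_breaks token_locations)

-- ===== LEMMAS AND PROOFS =====

-- bisect_left invariant: everything left of the result is < t, everything from the result on is ≥ t
theorem pvBisect_props (s : List Int) (t : Int) (hs : s.Pairwise (· ≤ ·))
    (lo hi : Nat) (hlh : lo ≤ hi) (hhi : hi ≤ s.length)
    (hlow : ∀ j (hj : j < s.length), j < lo → s[j] < t)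
    (hhigh : ∀ j (hj : j < s.length), hi ≤ j → ¬ s[j] < t) :
    pvBisect s t lo hi ≤ hi ∧
    (∀ j (hj : j < s.length), j < pvBisect s t lo hi → s[j] < t) ∧
    (∀ j (hj : j < s.length), pvBisect s t lo hi ≤ j → ¬ s[j] < t) := by
  fun_induction pvBisect s t lo hi with
  | case1 lo hi hlt hmid ih =>
    have hmlt : (lo + hi) / 2 < s.length := by omega
    rw [List.getD_eq_getElem s 0 hmlt] at hmid
    have hmono : ∀ j (hj : j < s.length), j ≤ (lo + hi) / 2 → s[j] ≤ s[(lo + hi) / 2] := by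
      intro j hj hjle
      rcases Nat.lt_or_ge j ((lo + hi) / 2) with h | h
      · exact List.pairwise_iff_getElem.mp hs j _ hj hmlt h
      · have : j = (lo + hi) / 2 := by omega
        subst this; exact le_refl _
    exact ih (by omega) hhi
      (fun j hj hjlt => lt_of_le_of_lt (hmono j hj (by omega)) hmid)
      hhigh
  | case2 lo hi hlt hmid ih =>
    have hmlt : (lo + hi) / 2 < s.length := by omega
    rw [List.getD_eq_getElem s 0 hmlt] at hmid
    have hhigh' : ∀ j (hj : j < s.length), (lo + hi) / 2 ≤ j → ¬ s[j] < t := by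
      intro j hj hle
      have h1 : s[(lo + hi) / 2] ≤ s[j] := by
        rcases Nat.lt_or_ge ((lo + hi) / 2) j with h | h
        · exact List.pairwise_iff_getElem.mp hs _ j hmlt hj h
        · have : j = (lo + hi) / 2 := by omega
          subst this; exact le_refl _
      omega
    obtain ⟨ha, hb, hc⟩ := ih (by omega) (by omega) hlow hhigh'
    exact ⟨by omega, hb, hc⟩
  | case3 lo hi hnlt =>
    exact ⟨hlh, fun j hj hjlt => hlow j hj hjlt, fun j hj hle => hhigh j hj (by omega)⟩

-- per-token: A's max-of-filter equals B's sorted-array predecessor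
theorem pv_lb_eq (line_breaks : List Int) (t : Int) :
    (match PySem.List.max? (line_breaks.filter (fun i => decide (i < t))) (fun x => x) with
      | none => -1
      | some m => m) =
    (if pvBisect (PySem.List.sorted line_breaks (fun x => x) false) t 0
          (PySem.List.sorted line_breaks (fun x => x) false).length = 0 then (-1 : Int)
     else (PySem.List.sorted line_breaks (fun x => x) false).getD
          (pvBisect (PySem.List.sorted line_breaks (fun x => x) false) t 0
            (PySem.List.sorted line_breaks (fun x => x) false).length - 1) 0) := by
  set s := PySem.List.sorted line_breaks (fun x => x) false with hsdef
  have hs : s.Pairwise (· ≤ ·) := PySem.List.sorted_pairwise line_breaks (fun x => x)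
  have hperm : s.Perm line_breaks := PySem.List.sorted_perm line_breaks (fun x => x) false
  have hpf : (s.filter (fun i => decide (i < t))).Perm
      (line_breaks.filter (fun i => decide (i < t))) := hperm.filter _
  obtain ⟨hle, hlt, hge⟩ := pvBisect_props s t hs 0 s.length (Nat.zero_le _) (le_refl _)
    (by omega) (by intro j hj h; omega)
  set idx := pvBisect s t 0 s.length with hidx
  by_cases h0 : idx = 0
  · -- no break is < t: the filtered list is empty
    have hnil : line_breaks.filter (fun i => decide (i < t)) = [] := by
      rw [List.eq_nil_iff_forall_not_mem]
      intro x hx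
      have hxs : x ∈ s := hperm.mem_iff.mpr (List.mem_of_mem_filter hx)
      have hxt : x < t := by simpa using List.of_mem_filter hx
      obtain ⟨j, hj, rfl⟩ := List.getElem_of_mem hxs
      exact hge j hj (by omega) hxt
    rw [hnil]
    have hred : (match (PySem.List.max? ([] : List Int) (fun x => x)) with
      | none => (-1 : Int) | some m => m) = -1 := rfl
    rw [hred, if_pos h0]
  · -- idx ≥ 1 and s[idx-1] is the max of the filtered list
    have hi1 : idx - 1 < s.length := by omega
    have hsm : s[idx - 1] < t := hlt (idx - 1) hi1 (by omega)
    have hmem : s[idx - 1] ∈ line_breaks.filter (fun i => decide (i < t)) := by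
      refine List.mem_filter.mpr ⟨hperm.mem_iff.mp (List.getElem_mem hi1), by simpa using hsm⟩
    obtain ⟨m, hm⟩ : ∃ m, PySem.List.max? (line_breaks.filter (fun i => decide (i < t)))
        (fun x => x) = some m := by
      cases hflt : line_breaks.filter (fun i => decide (i < t)) with
      | nil => rw [hflt] at hmem; simp at hmem
      | cons x xs => exact ⟨xs.foldl max x, PySem.List.max?_id_cons x xs⟩
    have hmmem : m ∈ line_breaks.filter (fun i => decide (i < t)) := PySem.List.max?_mem hm
    have hmax : ∀ y ∈ line_breaks.filter (fun i => decide (i < t)), y ≤ m :=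
      PySem.List.max?_isMax hm
    have h1 : m ≤ s[idx - 1] := by
      obtain ⟨j, hj, rfl⟩ := List.getElem_of_mem (hperm.mem_iff.mpr (List.mem_of_mem_filter hmmem))
      have hjt : s[j] < t := by simpa using List.of_mem_filter hmmem
      have hjlt : j < idx := by
        by_contra hc
        exact hge j hj (by omega) hjt
      rcases Nat.lt_or_ge j (idx - 1) with h | h
      · exact List.pairwise_iff_getElem.mp hs j (idx - 1) hj hi1 h
      · have : j = idx - 1 := by omega
        subst this; exact le_refl _
    have h2 : s[idx - 1] ≤ m := hmax _ hmem
    rw [hm]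
    have hred : (match (some m : Option Int) with
      | none => (-1 : Int) | some m => m) = m := rfl
    rw [hred, if_neg h0, List.getD_eq_getElem s 0 hi1]
    omega

theorem pvGo_eq (code : String) (line_breaks : List Int) (ts : List Int) :
    pvGoA code line_breaks ts =
      pvGoB code (PySem.List.sorted line_breaks (fun x => x) false) ts := by
  induction ts with
  | nil => rfl
  | cons t ts ih =>
    simp only [pvGoA, pvGoB]
    rw [pv_lb_eq line_breaks t, ih]

-- ===== VERDICT (by name: the statement is the Claim_ definition above) =====
theorem avoid_definition_spec : Claim_equal_avoid_definition := by
  intro code line_breaks token_locations _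
  unfold Spec_avoid_definition avoid_definition avoid_definition_alt
  exact pvGo_eq code line_breaks token_locations
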